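-- pv_equiv track=rewrite | github.com/Philip205/Queens | Queens.py | CountLeftDiagonal
-- ===== SOURCE A (Python) =====
-- def CountLeftDiagonal(index, buf):
--     x = index;
--     y = buf[index];
--     count = 0;
--
--     if(x < y):
--         y = y - x;
--         x = 0;
--
--         while(y < 8):
--             if(buf[x] == y):
--                 count = count + 1;
--
--             x = x + 1;
--             y = y + 1;
--     else:
--         x = x - y;
--         y = 0;
--
--         while(x < 8):
--             if(buf[x] == y):
--                 count = count + 1;
--
--             x = x + 1;
--             y = y + 1;
--
--     return count;
-- ===== SOURCE B (Python) =====
-- def CountLeftDiagonal(index, buf):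
--     # Stage 1: classify every on-board queen in the first 8 columns by its
--     # left-diagonal key v - x.  Stage 2: count how many share the key of the
--     # queen in column `index`.
--     keys = [v - x for x, v in enumerate(buf[:8]) if 0 <= v < 8]
--     return keys.count(buf[index] - index)
-- ===== Notes on version B (the rewrite author's own statement) =====
-- stated objective: alternative
-- what changed: Instead of locating the diagonal's start and walking along it cell by cell (A's branch on which side of the diagonal plus a mutating (x,y) cursor loop), B never walks the diagonal: it classifies every on-board queen by its diagonal key v - x into a list of keys, then returns the multiplicity of the queried queen's key in that list.
import Mathlib
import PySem

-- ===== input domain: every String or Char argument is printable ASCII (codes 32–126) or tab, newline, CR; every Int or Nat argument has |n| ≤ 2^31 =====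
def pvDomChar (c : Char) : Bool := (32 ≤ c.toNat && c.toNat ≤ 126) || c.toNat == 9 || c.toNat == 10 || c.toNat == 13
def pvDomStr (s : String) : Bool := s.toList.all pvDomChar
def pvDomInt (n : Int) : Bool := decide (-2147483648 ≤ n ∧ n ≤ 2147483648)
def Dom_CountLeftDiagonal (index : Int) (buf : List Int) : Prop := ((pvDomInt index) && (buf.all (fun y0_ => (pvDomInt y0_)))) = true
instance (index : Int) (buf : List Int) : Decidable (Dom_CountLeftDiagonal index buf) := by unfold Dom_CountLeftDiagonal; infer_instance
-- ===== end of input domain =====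

-- B never walks the diagonal: it classifies each on-board queen by its diagonal key v - x
-- into a list and returns the multiplicity of the queried queen's key (objective: alternative).

-- ===== PORT A =====
-- while(y < 8): if buf[x] == y: count += 1; x += 1; y += 1
-- (under Pre_ every buf[x] is in range; the 'none' arm of the comparison is unreachable there)
def pvLoopA1 (buf : List Int) (x y count : Int) : Int :=
  if _h : y < 8 then
    pvLoopA1 buf (x + 1) (y + 1)
      (if PySem.List.pyGet? buf x = some y then count + 1 else count)
  else count
termination_by (8 - y).toNat
decreasing_by omega

-- while(x < 8): if buf[x] == y: count += 1; x += 1; y += 1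
def pvLoopA2 (buf : List Int) (x y count : Int) : Int :=
  if _h : x < 8 then
    pvLoopA2 buf (x + 1) (y + 1)
      (if PySem.List.pyGet? buf x = some y then count + 1 else count)
  else count
termination_by (8 - x).toNat
decreasing_by omega

def CountLeftDiagonal (index : Int) (buf : List Int) : Int :=
  match PySem.List.pyGet? buf index with
  | none => 0   -- y = buf[index] raises in Python; excluded by Pre_
  | some y =>
    if index < y then pvLoopA1 buf 0 (y - index) 0
    else pvLoopA2 buf (index - y) 0 0

-- ===== PORT B =====
-- keys = [v - x for x, v in enumerate(buf[:8]) if 0 <= v < 8]; return keys.count(buf[index] - index)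
def CountLeftDiagonal_alt (index : Int) (buf : List Int) : Int :=
  match PySem.List.pyGet? buf index with
  | none => 0   -- buf[index] raises in Python; excluded by Pre_
  | some y =>
    let keys :=
      ((PySem.List.enumerate (PySem.List.slice buf none (some 8)) 0).filter
        (fun p => decide (0 ≤ p.2 ∧ p.2 < 8))).map (fun p => p.2 - p.1)
    PySem.List.count keys (y - index)

-- ===== PRECONDITION & SPEC =====
-- Pre_ is exactly the set of inputs on which the Python A returns (no IndexError): buf[index]
-- must be a valid (possibly negative) index access, and with d = buf[index] - index every cell
-- the diagonal walk reads (the x with 0 ≤ x < 8 and 0 ≤ x + d < 8) must be inside buf.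
def Pre_CountLeftDiagonal (index : Int) (buf : List Int) : Prop :=
  PySem.List.pyGet? buf index ≠ none ∧
  (let d := (PySem.List.pyGet? buf index).getD 0 - index
   8 ≤ d ∨ d ≤ -8 ∨ (0 ≤ d ∧ 8 - d ≤ (buf.length : Int)) ∨ (d < 0 ∧ 8 ≤ (buf.length : Int)))
instance (index : Int) (buf : List Int) : Decidable (Pre_CountLeftDiagonal index buf) := by
  unfold Pre_CountLeftDiagonal; infer_instance

def pvWitness_CountLeftDiagonal : Int × List Int := (0, [0, 2, 4, 6, 1, 3, 5, 7])

def Spec_CountLeftDiagonal (index : Int) (buf : List Int) (out : Int) : Prop := out = CountLeftDiagonal_alt index buf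
instance (index : Int) (buf : List Int) (out : Int) : Decidable (Spec_CountLeftDiagonal index buf out) := by unfold Spec_CountLeftDiagonal; infer_instance

-- ===== CLAIM (what is proved, stated in full; the proofs are below) =====
def Claim_equal_CountLeftDiagonal : Prop := ∀ (index : Int) (buf : List Int), Dom_CountLeftDiagonal index buf → Pre_CountLeftDiagonal index buf → Spec_CountLeftDiagonal index buf (CountLeftDiagonal index buf)

-- ===== LEMMAS AND PROOFS =====

-- A's first while-loop counts the matches along the remaining diagonal cells.
lemma pvLoop1_eq (buf : List Int) (d : Int) : ∀ (k : Nat) (x c : Int), 8 - (x + d) ≤ (k : Int) →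
    pvLoopA1 buf x (x + d) c
      = c + (((PySem.List.pyRange x (8 - d) 1).countP
          (fun t => decide (PySem.List.pyGet? buf t = some (t + d)))) : Int) := by
  intro k
  induction k with
  | zero =>
    intro x c h
    rw [pvLoopA1, dif_neg (by omega), PySem.List.pyRange_one_eq_nil (by omega)]
    simp
  | succ k ih =>
    intro x c h
    by_cases hlt : x + d < 8
    · rw [pvLoopA1, dif_pos hlt, PySem.List.pyRange_one_cons (show x < 8 - d by omega),
        List.countP_cons]
      rw [show x + d + 1 = (x + 1) + d from by ring]
      rw [ih (x + 1) _ (by omega)]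
      by_cases hp : PySem.List.pyGet? buf x = some (x + d)
      · rw [if_pos hp]; simp [hp]; ring
      · rw [if_neg hp]; simp [hp]
    · rw [pvLoopA1, dif_neg hlt, PySem.List.pyRange_one_eq_nil (by omega)]
      simp

-- A's second while-loop counts the matches along the remaining diagonal cells.
lemma pvLoop2_eq (buf : List Int) (d : Int) : ∀ (k : Nat) (x c : Int), 8 - x ≤ (k : Int) →
    pvLoopA2 buf x (x + d) c
      = c + (((PySem.List.pyRange x 8 1).countP
          (fun t => decide (PySem.List.pyGet? buf t = some (t + d)))) : Int) := by
  intro k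
  induction k with
  | zero =>
    intro x c h
    rw [pvLoopA2, dif_neg (by omega), PySem.List.pyRange_one_eq_nil (by omega)]
    simp
  | succ k ih =>
    intro x c h
    by_cases hlt : x < 8
    · rw [pvLoopA2, dif_pos hlt, PySem.List.pyRange_one_cons (show x < 8 by omega),
        List.countP_cons]
      rw [show x + d + 1 = (x + 1) + d from by ring]
      rw [ih (x + 1) _ (by omega)]
      by_cases hp : PySem.List.pyGet? buf x = some (x + d)
      · rw [if_pos hp]; simp [hp]; ring
      · rw [if_neg hp]; simp [hp]
    · rw [pvLoopA2, dif_neg hlt, PySem.List.pyRange_one_eq_nil (by omega)]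
      simp

-- A, as a guarded countP over the 8 columns (range guard 0 ≤ x+d < 8 made explicit).
lemma pvA_eq_countP (index : Int) (buf : List Int) (y : Int)
    (hy : PySem.List.pyGet? buf index = some y) :
    CountLeftDiagonal index buf
      = (((PySem.List.pyRange 0 8 1).countP
          (fun x => decide (0 ≤ x + (y - index) ∧ x + (y - index) < 8 ∧
            PySem.List.pyGet? buf x = some (x + (y - index))))) : Int) := by
  unfold CountLeftDiagonal
  rw [hy]
  dsimp only
  set d := y - index with hd
  by_cases hlt : index < y
  · rw [if_pos hlt]
    have hd1 : 1 ≤ d := by omega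
    have h1 := pvLoop1_eq buf d 8 0 0 (by omega)
    rw [show (0 : Int) + d = d from by ring] at h1
    rw [h1, zero_add]
    by_cases hbig : 8 ≤ d
    · have hz : List.countP (fun x => decide (0 ≤ x + d ∧ x + d < 8 ∧
          PySem.List.pyGet? buf x = some (x + d))) (PySem.List.pyRange 0 8 1) = 0 := by
        apply List.countP_eq_zero.mpr
        intro a ha
        rw [PySem.List.mem_pyRange_one] at ha
        simp only [decide_eq_true_eq, not_and]
        intro _ h2 _
        exact absurd h2 (by omega)
      rw [PySem.List.pyRange_one_eq_nil (by omega), hz]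
      simp
    · rw [PySem.List.pyRange_one_append 0 (8 - d) 8 (by omega) (by omega),
        List.countP_append]
      have hz : List.countP (fun x => decide (0 ≤ x + d ∧ x + d < 8 ∧
          PySem.List.pyGet? buf x = some (x + d))) (PySem.List.pyRange (8 - d) 8 1) = 0 := by
        apply List.countP_eq_zero.mpr
        intro a ha
        rw [PySem.List.mem_pyRange_one] at ha
        simp only [decide_eq_true_eq, not_and]
        intro _ h2 _
        exact absurd h2 (by omega)
      rw [hz, Nat.add_zero]
      have hc : List.countP (fun t => decide (PySem.List.pyGet? buf t = some (t + d)))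
          (PySem.List.pyRange 0 (8 - d) 1)
          = List.countP (fun x => decide (0 ≤ x + d ∧ x + d < 8 ∧
              PySem.List.pyGet? buf x = some (x + d))) (PySem.List.pyRange 0 (8 - d) 1) := by
        apply List.countP_congr
        intro a ha
        rw [PySem.List.mem_pyRange_one] at ha
        simp only [decide_eq_true_eq]
        constructor
        · intro h; exact ⟨by omega, by omega, h⟩
        · rintro ⟨_, _, h⟩; exact h
      rw [hc]
  · rw [if_neg hlt]
    have hd0 : d ≤ 0 := by omega
    rw [show index - y = -d from by omega]
    have h2 := pvLoop2_eq buf d 8 (-d) 0 (by omega)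
    rw [show -d + d = (0 : Int) from by ring] at h2
    rw [h2, zero_add]
    by_cases hbig : 8 ≤ -d
    · have hz : List.countP (fun x => decide (0 ≤ x + d ∧ x + d < 8 ∧
          PySem.List.pyGet? buf x = some (x + d))) (PySem.List.pyRange 0 8 1) = 0 := by
        apply List.countP_eq_zero.mpr
        intro a ha
        rw [PySem.List.mem_pyRange_one] at ha
        simp only [decide_eq_true_eq, not_and]
        intro h1
        exact absurd h1 (by omega)
      rw [PySem.List.pyRange_one_eq_nil (by omega), hz]
      simp
    · rw [PySem.List.pyRange_one_append 0 (-d) 8 (by omega) (by omega),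
        List.countP_append]
      have hz : List.countP (fun x => decide (0 ≤ x + d ∧ x + d < 8 ∧
          PySem.List.pyGet? buf x = some (x + d))) (PySem.List.pyRange 0 (-d) 1) = 0 := by
        apply List.countP_eq_zero.mpr
        intro a ha
        rw [PySem.List.mem_pyRange_one] at ha
        simp only [decide_eq_true_eq, not_and]
        intro h1
        exact absurd h1 (by omega)
      rw [hz, Nat.zero_add]
      have hc : List.countP (fun t => decide (PySem.List.pyGet? buf t = some (t + d)))
          (PySem.List.pyRange (-d) 8 1)
          = List.countP (fun x => decide (0 ≤ x + d ∧ x + d < 8 ∧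
              PySem.List.pyGet? buf x = some (x + d))) (PySem.List.pyRange (-d) 8 1) := by
        apply List.countP_congr
        intro a ha
        rw [PySem.List.mem_pyRange_one] at ha
        simp only [decide_eq_true_eq]
        constructor
        · intro h; exact ⟨by omega, by omega, h⟩
        · rintro ⟨_, _, h⟩; exact h
      rw [hc]

-- B's key-list count is the same guarded countP over the 8 columns (for ANY buf).
lemma pvB_eq_countP (buf : List Int) (d : Int) :
    PySem.List.count
      (((PySem.List.enumerate (PySem.List.slice buf none (some 8)) 0).filter
        (fun p => decide (0 ≤ p.2 ∧ p.2 < 8))).map (fun p => p.2 - p.1)) d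
      = (PySem.List.pyRange 0 8 1).countP
          (fun x => decide (0 ≤ x + d ∧ x + d < 8 ∧
            PySem.List.pyGet? buf x = some (x + d))) := by
  have hslice : PySem.List.slice buf none (some 8) = buf.take 8 := by
    have := PySem.List.slice_to buf (b := 8) (by norm_num)
    simpa using this
  rw [hslice, PySem.List.count_eq, List.count_eq_countP, List.countP_map,
    PySem.List.enumerate_eq_map_pyRange (buf.take 8) 0, List.countP_filter, List.countP_map]
  set xs := buf.take 8 with hxs
  have hlen : xs.length = min 8 buf.length := by simp [hxs]
  have hle : (xs.length : Int) ≤ 8 := by omega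
  rw [PySem.List.len_eq]
  rw [PySem.List.pyRange_one_append 0 (xs.length : Int) 8 (by omega) hle]
  rw [List.countP_append]
  have hz : List.countP
      (fun x => decide (0 ≤ x + d ∧ x + d < 8 ∧ PySem.List.pyGet? buf x = some (x + d)))
      (PySem.List.pyRange (xs.length : Int) 8 1) = 0 := by
    apply List.countP_eq_zero.mpr
    intro a ha
    rw [PySem.List.mem_pyRange_one] at ha
    simp only [decide_eq_true_eq, not_and]
    intro _ _ hget
    have hnone : PySem.List.pyGet? buf a = none := by
      rw [PySem.List.pyGet?_eq_none_iff]
      intro hin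
      rcases hin with ⟨_, hlt⟩
      omega
    rw [hget] at hnone
    exact absurd hnone (by simp)
  rw [hz, Nat.add_zero]
  apply List.countP_congr
  intro a ha
  rw [PySem.List.mem_pyRange_one] at ha
  have ha0 : 0 ≤ a := ha.1
  have halen : a < xs.length := by omega
  have habuf : a.toNat < buf.length := by omega
  have ha8 : a < 8 := by omega
  have hgd : PySem.List.pyGetD xs a 0 = buf[a.toNat] := by
    rw [PySem.List.pyGetD_eq_getElem (h0 := ha0) (h1 := by omega)]
    exact List.getElem_take
  have hget : PySem.List.pyGet? buf a = some buf[a.toNat] :=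
    PySem.List.pyGet?_eq_some_getElem (h0 := ha0) (h1 := by omega)
  simp only [Function.comp, hgd, Bool.and_eq_true, beq_iff_eq, decide_eq_true_eq, hget]
  constructor
  · rintro ⟨hk, h0, h8⟩
    exact ⟨by omega, by omega, by rw [show a + d = buf[a.toNat] from by omega]⟩
  · rintro ⟨h0, h8, heq⟩
    have hv : buf[a.toNat] = a + d := by injection heq
    exact ⟨by omega, by omega, by omega⟩


-- The two ports agree wherever buf[index] exists.
lemma pvPorts_eq (index : Int) (buf : List Int) :
    CountLeftDiagonal index buf = CountLeftDiagonal_alt index buf := by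
  cases hy : PySem.List.pyGet? buf index with
  | none => unfold CountLeftDiagonal CountLeftDiagonal_alt; rw [hy]
  | some y =>
    rw [pvA_eq_countP index buf y hy]
    unfold CountLeftDiagonal_alt
    rw [hy]
    dsimp only
    rw [pvB_eq_countP buf (y - index)]

-- ===== VERDICT (by name: the statement is the Claim_ definition above) =====
theorem CountLeftDiagonal_spec : Claim_equal_CountLeftDiagonal := by
  intro index buf _ _
  exact pvPorts_eq index buf
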